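-- pv_equiv track=rewrite | github.com/Joy-Mbuvi/mini-recon-tool | reconciler/views.py | compare_datasets
-- ===== SOURCE A (Python) =====
-- def compare_datasets(internal_data, provider_data):
--     internal_headers = internal_data[0]
--     provider_headers = provider_data[0]
--
--     internal_transactions = {}
--     for row in internal_data[1:]:
--         if len(row) < 4:
--             continue
--         transaction_ref = row[0]
--         internal_transactions[transaction_ref] = {
--             'amount (KSH)': row[1],
--             'status': row[2],
--             'time stamps': row[3]
--         }
--
--     provider_transactions = {}
--     for row in provider_data[1:]:
--         if len(row) < 4:
--             continue
--         transaction_ref = row[0]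
--         provider_transactions[transaction_ref] = {
--             'amount (KSH)': row[1],
--             'status': row[2],
--             'time stamps': row[3]
--         }
--
--     matched = {}
--     only_internal = {}
--     only_provider = {}
--     mismatches = {}
--
--     for ref, data in internal_transactions.items():
--         if ref in provider_transactions:
--             provider_data = provider_transactions[ref]
--             if data != provider_data:
--                 mismatches[ref] = {
--                     'internal_amount': data['amount (KSH)'],
--                     'provider_amount': provider_data['amount (KSH)'],
--                     'internal_status': data['status'],
--                     'provider_status': provider_data['status']
--                 }
--             else:
--                 matched[ref] = data
--         else:
--             only_internal[ref] = data
--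
--     for ref, data in provider_transactions.items():
--         if ref not in internal_transactions:
--             only_provider[ref] = data
--
--     return {
--         'matched': matched,
--         'only_internal': only_internal,
--         'only_provider': only_provider,
--         'mismatches': mismatches
--     }
-- ===== SOURCE B (Python) =====
-- def compare_datasets(internal_data, provider_data):
--     # One merged table ref -> [internal_value_or_None, provider_value_or_None],
--     # filled by a single tagged pass over both datasets; then one classification
--     # pass over the merged table (no membership tests anywhere).
--     merged = {}
--     for side, rows in ((0, internal_data[1:]), (1, provider_data[1:])):
--         for row in rows:
--             if len(row) < 4:
--                 continue
--             entry = merged.setdefault(row[0], [None, None])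
--             entry[side] = {'amount (KSH)': row[1], 'status': row[2],
--                            'time stamps': row[3]}
--     matched, only_internal, only_provider, mismatches = {}, {}, {}, {}
--     for ref, (iv, pv) in merged.items():
--         if iv is not None and pv is not None:
--             if iv == pv:
--                 matched[ref] = iv
--             else:
--                 mismatches[ref] = {'internal_amount': iv['amount (KSH)'],
--                                    'provider_amount': pv['amount (KSH)'],
--                                    'internal_status': iv['status'],
--                                    'provider_status': pv['status']}
--         elif iv is not None:
--             only_internal[ref] = iv
--         else:
--             only_provider[ref] = pv
--     return {'matched': matched, 'only_internal': only_internal,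
--             'only_provider': only_provider, 'mismatches': mismatches}
-- ===== Notes on version B (the rewrite author's own statement) =====
-- stated objective: alternative
-- what changed: A builds two separate ref->data dicts and classifies by membership tests of one dict in the other across two loops; B builds a single merged table ref -> [internal?, provider?] in one tagged pass over both datasets and classifies each merged entry by which sides are present, with no membership tests at all.
import Mathlib
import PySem

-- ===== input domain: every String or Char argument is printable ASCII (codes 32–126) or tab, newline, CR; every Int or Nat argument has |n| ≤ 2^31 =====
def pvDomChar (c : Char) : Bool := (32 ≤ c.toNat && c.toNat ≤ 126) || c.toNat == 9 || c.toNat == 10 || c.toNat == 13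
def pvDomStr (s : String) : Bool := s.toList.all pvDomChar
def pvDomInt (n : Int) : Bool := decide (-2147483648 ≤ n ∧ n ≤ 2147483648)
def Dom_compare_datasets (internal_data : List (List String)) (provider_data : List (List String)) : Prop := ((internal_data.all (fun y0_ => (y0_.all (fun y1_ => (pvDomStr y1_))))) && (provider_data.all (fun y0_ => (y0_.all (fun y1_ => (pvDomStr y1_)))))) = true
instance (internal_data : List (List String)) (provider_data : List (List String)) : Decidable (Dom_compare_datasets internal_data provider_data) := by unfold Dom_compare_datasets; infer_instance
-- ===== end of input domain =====

-- B replaces A's two ref->data dicts and membership-test classification by a single merged table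
-- ref -> (internal?, provider?) filled in one tagged pass and classified by presence (objective:
-- alternative decomposition, not claimed faster).

-- shared tiny helper: d[key] on the fixed row/mismatch dicts (key always present, so the KeyError
-- branch of Python's d[key] is unreachable; exact here)
def vget (v : List (String × String)) (k : String) : String :=
  ((PySem.Dict.mk v).get? k).getD ""

-- the 3-key value dict both programs build per row (row[i] for i<4 is in range under the
-- length guard, so getD is exact)
def rowVal (row : List String) : List (String × String) :=
  [("amount (KSH)", row.getD 1 ""), ("status", row.getD 2 ""), ("time stamps", row.getD 3 "")]

def mismatchEntry (data pd : List (String × String)) : List (String × String) :=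
  [("internal_amount", vget data "amount (KSH)"), ("provider_amount", vget pd "amount (KSH)"),
   ("internal_status", vget data "status"), ("provider_status", vget pd "status")]

-- ===== PORT A =====
-- A's two index-building loops
def mkTx (rows : List (List String)) : PySem.Dict String (List (String × String)) :=
  (PySem.List.slice rows (some 1) none).foldl
    (fun d row => if row.length < 4 then d else d.insert (row.getD 0 "") (rowVal row))
    PySem.Dict.empty

def compare_datasets (internal_data : List (List String)) (provider_data : List (List String)) : List (String × List (String × List (String × String))) :=
  -- internal_data[0]/provider_data[0] are read into unused header variables; they raise IndexError
  -- exactly on an empty argument, which Pre_ excludes.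
  let internal_transactions := mkTx internal_data
  let provider_transactions := mkTx provider_data
  let r := internal_transactions.items.foldl
    (fun (acc : PySem.Dict String (List (String × String)) × PySem.Dict String (List (String × String)) × PySem.Dict String (List (String × String))) kv =>
      let (matched, only_internal, mismatches) := acc
      if provider_transactions.contains kv.1 then
        let pd := provider_transactions.getD kv.1 []   -- provider_transactions[ref]: key present
        if kv.2 ≠ pd then (matched, only_internal, mismatches.insert kv.1 (mismatchEntry kv.2 pd))
        else (matched.insert kv.1 kv.2, only_internal, mismatches)
      else (matched, only_internal.insert kv.1 kv.2, mismatches))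
    (PySem.Dict.empty, PySem.Dict.empty, PySem.Dict.empty)
  let only_provider := provider_transactions.items.foldl
    (fun d kv => if internal_transactions.contains kv.1 then d else d.insert kv.1 kv.2)
    PySem.Dict.empty
  [("matched", r.1.items), ("only_internal", r.2.1.items),
   ("only_provider", only_provider.items), ("mismatches", r.2.2.items)]

-- ===== PORT B =====
-- B's inner row loop, one side of the merged table: 'entry = merged.setdefault(ref, [None, None]);
-- entry[side] = {...}' reads the current pair and writes one component back — exact, since mutating
-- the 2-slot list stored under ref equals re-inserting the updated pair at the same key (insert
-- keeps the position of an existing key).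
def mergeStep (internal : Bool)
    (m : PySem.Dict String (Option (List (String × String)) × Option (List (String × String))))
    (row : List String) :
    PySem.Dict String (Option (List (String × String)) × Option (List (String × String))) :=
  if row.length < 4 then m
  else
    let cur := m.getD (row.getD 0 "") (none, none)
    if internal then m.insert (row.getD 0 "") (some (rowVal row), cur.2)
    else m.insert (row.getD 0 "") (cur.1, some (rowVal row))

-- B's classification of one merged entry; 'iv == pv' compares the two 3-key dicts, built with the
-- same keys in the same order, so list equality is exact. The (none, none) shape never occurs in
-- the merged table.
def classifyStep
    (acc : PySem.Dict String (List (String × String)) × PySem.Dict String (List (String × String)) × PySem.Dict String (List (String × String)) × PySem.Dict String (List (String × String)))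
    (kv : String × (Option (List (String × String)) × Option (List (String × String)))) :
    PySem.Dict String (List (String × String)) × PySem.Dict String (List (String × String)) × PySem.Dict String (List (String × String)) × PySem.Dict String (List (String × String)) :=
  let (matched, only_internal, only_provider, mismatches) := acc
  match kv.2 with
  | (some iv, some pv) =>
      if iv == pv then (matched.insert kv.1 iv, only_internal, only_provider, mismatches)
      else (matched, only_internal, only_provider, mismatches.insert kv.1 (mismatchEntry iv pv))
  | (some iv, none) => (matched, only_internal.insert kv.1 iv, only_provider, mismatches)
  | (none, pv) => (matched, only_internal, only_provider.insert kv.1 (pv.getD []), mismatches)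

def compare_datasets_alt (internal_data : List (List String)) (provider_data : List (List String)) : List (String × List (String × List (String × String))) :=
  let merged := (PySem.List.slice provider_data (some 1) none).foldl (mergeStep false)
    ((PySem.List.slice internal_data (some 1) none).foldl (mergeStep true) PySem.Dict.empty)
  let r := merged.items.foldl classifyStep
    (PySem.Dict.empty, PySem.Dict.empty, PySem.Dict.empty, PySem.Dict.empty)
  [("matched", r.1.items), ("only_internal", r.2.1.items),
   ("only_provider", r.2.2.1.items), ("mismatches", r.2.2.2.items)]

-- ===== PRECONDITION & SPEC =====
-- A reads internal_data[0] and provider_data[0] (unused header rows) and raises IndexError on an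
-- empty argument; Pre_ excludes exactly those inputs.
def Pre_compare_datasets (internal_data : List (List String)) (provider_data : List (List String)) : Prop :=
  internal_data ≠ [] ∧ provider_data ≠ []
instance (internal_data : List (List String)) (provider_data : List (List String)) : Decidable (Pre_compare_datasets internal_data provider_data) := by unfold Pre_compare_datasets; infer_instance
def pvWitness_compare_datasets : List (List String) × List (List String) :=
  ([["h"]], [["h"], ["a", "1", "x", "t"]])

def Spec_compare_datasets (internal_data : List (List String)) (provider_data : List (List String)) (out : List (String × List (String × List (String × String)))) : Prop := out = compare_datasets_alt internal_data provider_data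
instance (internal_data : List (List String)) (provider_data : List (List String)) (out : List (String × List (String × List (String × String)))) : Decidable (Spec_compare_datasets internal_data provider_data out) := by unfold Spec_compare_datasets; infer_instance

-- ===== CLAIM (what is proved, stated in full; the proofs are below) =====
def Claim_equal_compare_datasets : Prop := ∀ (internal_data : List (List String)) (provider_data : List (List String)), Dom_compare_datasets internal_data provider_data → Pre_compare_datasets internal_data provider_data → Spec_compare_datasets internal_data provider_data (compare_datasets internal_data provider_data)
-- ===== LEMMAS AND PROOFS =====

-- abbreviations used only by the proofs
abbrev TxVal : Type := List (String × String)
abbrev MVal : Type := Option TxVal × Option TxVal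

-- how B's merged table relates to A's two indexes: first all internal refs (with their provider
-- value if any), then the provider-only refs
def combineItems (it pt : PySem.Dict String TxVal) : List (String × MVal) :=
  it.items.map (fun p => (p.1, (some p.2, pt.get? p.1)))
    ++ (pt.items.filter (fun p => !it.contains p.1)).map (fun p => (p.1, ((none : Option TxVal), some p.2)))

-- first-match lookup over an explicit items list: append, key-preserving map, key filter
lemma get?_mk_append {ν : Type} (l1 l2 : List (String × ν)) (k : String) :
    (PySem.Dict.mk (l1 ++ l2)).get? k = ((PySem.Dict.mk l1).get? k).or ((PySem.Dict.mk l2).get? k) := by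
  induction l1 with
  | nil => simp [PySem.Dict.get?]
  | cons p rest ih =>
    obtain ⟨k1, v1⟩ := p
    rw [List.cons_append, PySem.Dict.get?_mk_cons, PySem.Dict.get?_mk_cons]
    by_cases h : (k1 == k) = true
    · simp [h]
    · simp only [h, if_false]; exact ih

lemma get?_mk_mapk {ν ν' : Type} (g : String × ν → ν') (l : List (String × ν)) (k : String) :
    (PySem.Dict.mk (l.map (fun p => (p.1, g p)))).get? k
      = ((PySem.Dict.mk l).get? k).map (fun v => g (k, v)) := by
  induction l with
  | nil => simp [PySem.Dict.get?]
  | cons p rest ih =>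
    obtain ⟨k1, v1⟩ := p
    rw [List.map_cons, PySem.Dict.get?_mk_cons, PySem.Dict.get?_mk_cons]
    by_cases h : (k1 == k) = true
    · have : k1 = k := by simpa using h
      subst this; simp [h]
    · simp only [h, if_false]; exact ih

lemma get?_mk_filter_key {ν : Type} (c : String → Bool) (l : List (String × ν)) (k : String) :
    (PySem.Dict.mk (l.filter (fun p => c p.1))).get? k
      = if c k then (PySem.Dict.mk l).get? k else none := by
  induction l with
  | nil => simp [PySem.Dict.get?]
  | cons p rest ih =>
    obtain ⟨k1, v1⟩ := p
    by_cases hc : c k1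
    · rw [List.filter_cons_of_pos (by simpa using hc), PySem.Dict.get?_mk_cons,
        PySem.Dict.get?_mk_cons, ih]
      by_cases h : (k1 == k) = true
      · have hk : k1 = k := by simpa using h
        subst hk
        simp [h, hc]
      · simp [h]
    · rw [List.filter_cons_of_neg (by simpa using hc), PySem.Dict.get?_mk_cons, ih]
      by_cases h : (k1 == k) = true
      · have hk : k1 = k := by simpa using h
        subst hk
        simp [hc]
      · simp [h]

-- lookups in the merged table
lemma combine_get?_some (it pt : PySem.Dict String TxVal)
    (m : PySem.Dict String MVal) (hm : m.items = combineItems it pt)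
    (k : String) (w : TxVal) (hw : it.get? k = some w) :
    m.get? k = some (some w, pt.get? k) := by
  obtain ⟨l⟩ := m
  simp only [PySem.Dict.items] at hm
  subst hm
  unfold combineItems
  rw [get?_mk_append, get?_mk_mapk (fun p => ((some p.2 : Option TxVal), pt.get? p.1))]
  show (((PySem.Dict.mk it.items).get? k).map _).or _ = _
  have : PySem.Dict.mk it.items = it := rfl
  rw [this, hw]
  simp

lemma combine_get?_none (it pt : PySem.Dict String TxVal)
    (m : PySem.Dict String MVal) (hm : m.items = combineItems it pt)
    (k : String) (hw : it.get? k = none) :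
    m.get? k = (pt.get? k).map (fun v => ((none : Option TxVal), some v)) := by
  obtain ⟨l⟩ := m
  simp only [PySem.Dict.items] at hm
  subst hm
  unfold combineItems
  rw [get?_mk_append, get?_mk_mapk (fun p => ((some p.2 : Option TxVal), pt.get? p.1)),
      get?_mk_mapk (fun p => ((none : Option TxVal), some p.2)),
      get?_mk_filter_key (fun x => !it.contains x)]
  have h1 : PySem.Dict.mk it.items = it := rfl
  have h2 : PySem.Dict.mk pt.items = pt := rfl
  rw [h1, h2, hw]
  have hc : it.contains k = false := by
    rw [PySem.Dict.contains_eq_isSome_get?, hw]; rfl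
  simp [hc]

lemma combine_getD_fst (it pt : PySem.Dict String TxVal)
    (m : PySem.Dict String MVal) (hm : m.items = combineItems it pt) (k : String) :
    (m.getD k ((none : Option TxVal), (none : Option TxVal))).1 = it.get? k := by
  rcases hw : it.get? k with _ | w
  · rw [PySem.Dict.getD_eq_get?_getD, combine_get?_none it pt m hm k hw]
    rcases pt.get? k with _ | v <;> rfl
  · rw [PySem.Dict.getD_eq_get?_getD, combine_get?_some it pt m hm k w hw]
    rfl

-- inserting at a key the internal side owns leaves the provider-only segment unchanged
lemma seg2_insert_dead (it pt : PySem.Dict String TxVal) (r : String) (v : TxVal)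
    (hc : it.contains r = true) :
    (pt.insert r v).items.filter (fun p => !it.contains p.1)
      = pt.items.filter (fun p => !it.contains p.1) := by
  rw [PySem.Dict.items_insert]
  by_cases hpr : pt.contains r
  · rw [if_pos hpr, List.filter_map]
    have hfc : pt.items.filter ((fun p => !it.contains p.1) ∘ (fun p => if p.1 == r then (r, v) else p))
        = pt.items.filter (fun p => !it.contains p.1) := by
      apply List.filter_congr
      intro p _
      by_cases h : (p.1 == r) = true
      · have : p.1 = r := by simpa using h
        simp [Function.comp, h, this]
      · simp [Function.comp, h]
    rw [hfc]
    have hid : (pt.items.filter (fun p => !it.contains p.1)).map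
        (fun p => if (p.1 == r) = true then (r, v) else p)
        = (pt.items.filter (fun p => !it.contains p.1)).map id := by
      apply List.map_congr_left
      intro p hp
      have hkept := List.of_mem_filter hp
      by_cases h : (p.1 == r) = true
      · exfalso
        have : p.1 = r := by simpa using h
        rw [this, hc] at hkept
        simp at hkept
      · simp [h]
    simpa using hid
  · rw [if_neg hpr, List.filter_append]
    simp [hc]

-- inserting at a provider-owned key not on the internal side rewrites its provider-only entry
lemma seg2_insert_live (it pt : PySem.Dict String TxVal) (r : String) (v : TxVal)
    (hc : it.contains r = false) (hpr : pt.contains r = true) :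
    ((pt.items.filter (fun p => !it.contains p.1)).map
        (fun p => (p.1, ((none : Option TxVal), some p.2)))).map
      (fun q => if q.1 == r then (r, ((none : Option TxVal), some v)) else q)
      = ((pt.insert r v).items.filter (fun p => !it.contains p.1)).map
          (fun p => (p.1, ((none : Option TxVal), some p.2))) := by
  rw [PySem.Dict.items_insert_of_contains _ _ hpr, List.filter_map]
  have hfc : pt.items.filter ((fun p => !it.contains p.1) ∘ (fun p => if p.1 == r then (r, v) else p))
      = pt.items.filter (fun p => !it.contains p.1) := by
    apply List.filter_congr
    intro p _
    by_cases h : (p.1 == r) = true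
    · have : p.1 = r := by simpa using h
      simp [Function.comp, h, this]
    · simp [Function.comp, h]
  rw [hfc, List.map_map, List.map_map]
  apply List.map_congr_left
  intro p _
  by_cases h : (p.1 == r) = true
  · have : p.1 = r := by simpa using h
    simp [Function.comp, h, this]
  · simp [Function.comp, h]

-- ONE step of B's provider-phase loop tracks ONE step of A's provider index build
lemma combine_step (it pt : PySem.Dict String TxVal) (hit : it.keys.Nodup)
    (m : PySem.Dict String MVal) (hm : m.items = combineItems it pt) (r : String) (v : TxVal) :
    (m.insert r ((m.getD r ((none : Option TxVal), (none : Option TxVal))).1, some v)).items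
      = combineItems it (pt.insert r v) := by
  have hfst := combine_getD_fst it pt m hm r
  rcases hir : it.get? r with _ | w
  · rcases hpr : pt.get? r with _ | w2
    · -- fresh key in both: append on both sides
      have hmc : m.contains r = false := by
        rw [PySem.Dict.contains_eq_isSome_get?, combine_get?_none it pt m hm r hir, hpr]; rfl
      have hpc : pt.contains r = false := by
        rw [PySem.Dict.contains_eq_isSome_get?, hpr]; rfl
      have hic : it.contains r = false := by
        rw [PySem.Dict.contains_eq_isSome_get?, hir]; rfl
      rw [PySem.Dict.items_insert_of_not_contains _ _ hmc, hm]
      unfold combineItems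
      rw [PySem.Dict.items_insert_of_not_contains _ _ hpc, List.filter_append, List.map_append]
      have hseg1 : it.items.map (fun p => (p.1, ((some p.2 : Option TxVal), (pt.insert r v).get? p.1)))
          = it.items.map (fun p => (p.1, ((some p.2 : Option TxVal), pt.get? p.1))) := by
        apply List.map_congr_left
        intro p hp
        have hne : p.1 ≠ r := by
          intro he
          have := PySem.Dict.get?_of_mem_items _ hp hit
          rw [he, hir] at this; simp at this
        rw [PySem.Dict.get?_insert_of_ne _ _ hne]
      rw [hseg1, hfst, hir]
      simp [hic, List.append_assoc]
    · -- provider-only key: in-place rewrite of its provider-only entry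
      have hmg : m.get? r = some ((none : Option TxVal), some w2) := by
        rw [combine_get?_none it pt m hm r hir, hpr]
        rfl
      have hmc : m.contains r = true := by
        rw [PySem.Dict.contains_eq_isSome_get?, hmg]; rfl
      have hpc : pt.contains r = true := by
        rw [PySem.Dict.contains_eq_isSome_get?, hpr]; rfl
      have hic : it.contains r = false := by
        rw [PySem.Dict.contains_eq_isSome_get?, hir]; rfl
      rw [PySem.Dict.items_insert_of_contains _ _ hmc, hm]
      unfold combineItems
      rw [List.map_append, hfst, hir]
      have hseg1 : (it.items.map (fun p => (p.1, ((some p.2 : Option TxVal), pt.get? p.1)))).map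
          (fun q => if q.1 == r then (r, ((none : Option TxVal), some v)) else q)
          = it.items.map (fun p => (p.1, ((some p.2 : Option TxVal), (pt.insert r v).get? p.1))) := by
        rw [List.map_map]
        apply List.map_congr_left
        intro p hp
        have hne : p.1 ≠ r := by
          intro he
          have := PySem.Dict.get?_of_mem_items _ hp hit
          rw [he, hir] at this; simp at this
        have hb : (p.1 == r) = false := by simpa using hne
        simp [Function.comp, hb, PySem.Dict.get?_insert_of_ne _ _ hne]
      rw [hseg1, seg2_insert_live it pt r v hic hpc]
  · -- internal-owned key: in-place update of its pair's provider component
    have hmg : m.get? r = some ((some w : Option TxVal), pt.get? r) :=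
      combine_get?_some it pt m hm r w hir
    have hmc : m.contains r = true := by
      rw [PySem.Dict.contains_eq_isSome_get?, hmg]; rfl
    have hic : it.contains r = true := by
      rw [PySem.Dict.contains_eq_isSome_get?, hir]; rfl
    rw [PySem.Dict.items_insert_of_contains _ _ hmc, hm]
    unfold combineItems
    rw [List.map_append, hfst, hir]
    have hseg1 : (it.items.map (fun p => (p.1, ((some p.2 : Option TxVal), pt.get? p.1)))).map
        (fun q => if q.1 == r then (r, (some w, some v)) else q)
        = it.items.map (fun p => (p.1, ((some p.2 : Option TxVal), (pt.insert r v).get? p.1))) := by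
      rw [List.map_map]
      apply List.map_congr_left
      intro p hp
      by_cases h : (p.1 == r) = true
      · have he : p.1 = r := by simpa using h
        have hpv := PySem.Dict.get?_of_mem_items _ hp hit
        rw [he, hir] at hpv
        have hw : p.2 = w := by injection hpv with h2; exact h2.symm
        simp [Function.comp, h, he, hw, PySem.Dict.get?_insert_self]
      · have hne : p.1 ≠ r := by simpa using h
        simp [Function.comp, h, PySem.Dict.get?_insert_of_ne _ _ hne]
    have hseg2 : (((pt.items.filter (fun p => !it.contains p.1)).map
        (fun p => (p.1, ((none : Option TxVal), some p.2)))).map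
          (fun q => if q.1 == r then (r, (some w, some v)) else q))
        = ((pt.insert r v).items.filter (fun p => !it.contains p.1)).map
            (fun p => (p.1, ((none : Option TxVal), some p.2))) := by
      rw [seg2_insert_dead it pt r v hic, List.map_map]
      apply List.map_congr_left
      intro p hp
      have hkept := List.of_mem_filter hp
      have hne : (p.1 == r) = false := by
        by_contra hb
        have : p.1 = r := by simpa using (Bool.of_not_eq_false hb)
        rw [this, hic] at hkept
        simp at hkept
      simp [Function.comp, hne]
    rw [hseg1, hseg2]

-- B's internal phase tracks A's internal index build
lemma internal_inv (rows : List (List String)) (itq : PySem.Dict String TxVal)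
    (m : PySem.Dict String MVal)
    (hm : m.items = itq.items.map (fun p => (p.1, ((some p.2 : Option TxVal), (none : Option TxVal))))) :
    (rows.foldl (mergeStep true) m).items
      = ((rows.foldl (fun d row => if row.length < 4 then d else d.insert (row.getD 0 "") (rowVal row)) itq).items).map
          (fun p => (p.1, ((some p.2 : Option TxVal), (none : Option TxVal)))) := by
  induction rows generalizing itq m with
  | nil => simpa using hm
  | cons row rest ih =>
    rw [List.foldl_cons, List.foldl_cons]
    by_cases hlen : row.length < 4
    · rw [show mergeStep true m row = m from by simp [mergeStep, hlen], if_pos hlen]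
      exact ih itq m hm
    · rw [show mergeStep true m row
            = m.insert (row.getD 0 "") (some (rowVal row), (m.getD (row.getD 0 "") ((none : Option TxVal), (none : Option TxVal))).2)
          from by simp [mergeStep, hlen], if_neg hlen]
      apply ih
      obtain ⟨l⟩ := m
      have hml : l = itq.items.map (fun p => (p.1, ((some p.2 : Option TxVal), (none : Option TxVal)))) := hm
      subst hml
      set r := row.getD 0 "" with hr
      have hget : (PySem.Dict.mk (itq.items.map (fun p => (p.1, ((some p.2 : Option TxVal), (none : Option TxVal)))))).get? r
          = (itq.get? r).map (fun v => ((some v : Option TxVal), (none : Option TxVal))) := by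
        have := get?_mk_mapk (fun p : String × TxVal => ((some p.2 : Option TxVal), (none : Option TxVal))) itq.items r
        simpa using this
      have hsnd : ((PySem.Dict.mk (itq.items.map (fun p => (p.1, ((some p.2 : Option TxVal), (none : Option TxVal)))))).getD r ((none : Option TxVal), (none : Option TxVal))).2 = (none : Option TxVal) := by
        rw [PySem.Dict.getD_eq_get?_getD, hget]
        rcases itq.get? r with _ | w <;> rfl
      have hcon : (PySem.Dict.mk (itq.items.map (fun p => (p.1, ((some p.2 : Option TxVal), (none : Option TxVal)))))).contains r = itq.contains r := by
        rw [PySem.Dict.contains_eq_isSome_get?, PySem.Dict.contains_eq_isSome_get?, hget]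
        rcases itq.get? r with _ | w <;> rfl
      show ((PySem.Dict.mk (itq.items.map (fun p => (p.1, ((some p.2 : Option TxVal), (none : Option TxVal)))))).insert r
          (some (rowVal row), ((PySem.Dict.mk (itq.items.map (fun p => (p.1, ((some p.2 : Option TxVal), (none : Option TxVal)))))).getD r ((none : Option TxVal), (none : Option TxVal))).2)).items = _
      rw [hsnd]
      by_cases hc : itq.contains r
      · rw [PySem.Dict.items_insert_of_contains (PySem.Dict.mk (itq.items.map (fun p => (p.1, ((some p.2 : Option TxVal), (none : Option TxVal)))))) _ (by rw [hcon]; exact hc),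
            PySem.Dict.items_insert_of_contains itq _ hc]
        show ((itq.items.map _).map _) = _
        rw [List.map_map, List.map_map]
        apply List.map_congr_left
        intro p _
        by_cases h : (p.1 == r) = true
        · simp [Function.comp, h]
        · simp [Function.comp, h]
      · rw [PySem.Dict.items_insert_of_not_contains (PySem.Dict.mk (itq.items.map (fun p => (p.1, ((some p.2 : Option TxVal), (none : Option TxVal)))))) _ (by rw [hcon]; simpa using hc),
            PySem.Dict.items_insert_of_not_contains itq _ (by simpa using hc)]
        simp

-- B's provider phase tracks A's provider index build through the combined shape
lemma provider_inv (it : PySem.Dict String TxVal) (hit : it.keys.Nodup)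
    (rows : List (List String)) (pt : PySem.Dict String TxVal)
    (m : PySem.Dict String MVal) (hm : m.items = combineItems it pt) :
    (rows.foldl (mergeStep false) m).items
      = combineItems it
          (rows.foldl (fun d row => if row.length < 4 then d else d.insert (row.getD 0 "") (rowVal row)) pt) := by
  induction rows generalizing pt m with
  | nil => simpa using hm
  | cons row rest ih =>
    rw [List.foldl_cons, List.foldl_cons]
    by_cases hlen : row.length < 4
    · rw [show mergeStep false m row = m from by simp [mergeStep, hlen], if_pos hlen]
      exact ih pt m hm
    · rw [show mergeStep false m row
            = m.insert (row.getD 0 "") ((m.getD (row.getD 0 "") ((none : Option TxVal), (none : Option TxVal))).1, some (rowVal row))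
          from by simp [mergeStep, hlen], if_neg hlen]
      exact ih (pt.insert (row.getD 0 "") (rowVal row)) _
        (combine_step it pt hit m hm (row.getD 0 "") (rowVal row))

-- keys built by a guarded insert loop stay Nodup
lemma nodup_keys_mkTx_aux (l : List (List String)) (d : PySem.Dict String TxVal)
    (h : d.keys.Nodup) :
    (l.foldl (fun d row => if row.length < 4 then d else d.insert (row.getD 0 "") (rowVal row)) d).keys.Nodup := by
  induction l generalizing d with
  | nil => exact h
  | cons row rest ih =>
    simp only [List.foldl_cons]
    split
    · exact ih d h
    · exact ih _ (PySem.Dict.nodup_keys_insert _ _ _ h)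

lemma nodup_keys_mkTx (rows : List (List String)) : (mkTx rows).keys.Nodup :=
  nodup_keys_mkTx_aux _ _ PySem.Dict.nodup_keys_empty

-- the merged table's keys are distinct
lemma nodup_keys_combine (it pt : PySem.Dict String TxVal)
    (hit : it.keys.Nodup) (hpt : pt.keys.Nodup) :
    ((combineItems it pt).map Prod.fst).Nodup := by
  unfold combineItems
  rw [List.map_append, List.map_map, List.map_map]
  have h1 : it.items.map (Prod.fst ∘ fun p => (p.1, ((some p.2 : Option TxVal), pt.get? p.1))) = it.keys := rfl
  have h2 : (pt.items.filter (fun p => !it.contains p.1)).map (Prod.fst ∘ fun p => (p.1, ((none : Option TxVal), some p.2)))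
      = (pt.items.filter (fun p => !it.contains p.1)).map Prod.fst := rfl
  rw [h1, h2]
  refine List.Nodup.append hit ?_ ?_
  · have hsub : ((pt.items.filter (fun p => !it.contains p.1)).map Prod.fst).Sublist (pt.items.map Prod.fst) :=
      List.Sublist.map _ List.filter_sublist
    exact hsub.nodup hpt
  · intro k hk1 hk2
    obtain ⟨p, hp, hpk⟩ := List.mem_map.mp hk2
    have hf := List.of_mem_filter hp
    rw [hpk] at hf
    have hc2 : it.contains k = true := (PySem.Dict.contains_iff_mem_keys it k).mpr hk1
    rw [hc2] at hf
    simp at hf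

-- a 'filter comprehension' fold over fresh distinct keys appends exactly the filtered, mapped items
lemma items_foldl_filter_insert {α ν : Type} (c : String × α → Bool) (g : String × α → ν)
    (l : List (String × α)) (d : PySem.Dict String ν)
    (hnd : (l.map Prod.fst).Nodup) (hfresh : ∀ kv ∈ l, d.contains kv.1 = false) :
    (l.foldl (fun d kv => if c kv then d.insert kv.1 (g kv) else d) d).items
      = d.items ++ (l.filter c).map (fun kv => (kv.1, g kv)) := by
  induction l generalizing d with
  | nil => simp
  | cons kv rest ih =>
    simp only [List.map_cons, List.nodup_cons] at hnd
    have hfr : kv.1 ∉ rest.map Prod.fst := hnd.1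
    have hfresh' : ∀ p ∈ rest, d.contains p.1 = false := fun p hp => hfresh p (List.mem_cons_of_mem _ hp)
    simp only [List.foldl_cons, List.filter_cons]
    by_cases hc : c kv
    · have hinsfresh : ∀ p ∈ rest, (d.insert kv.1 (g kv)).contains p.1 = false := by
        intro p hp
        rw [PySem.Dict.contains_insert]
        have : p.1 ≠ kv.1 := fun he => hfr (he ▸ List.mem_map_of_mem hp)
        simp [this, hfresh' p hp]
      rw [if_pos hc, ih _ hnd.2 hinsfresh,
        PySem.Dict.items_insert_of_not_contains _ _ (hfresh kv (List.mem_cons_self ..))]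
      simp [hc]
    · rw [if_neg hc, ih _ hnd.2 hfresh']
      simp [hc]

-- characterisation of A's single three-bucket loop by three filters
lemma tri_foldl (pt : PySem.Dict String TxVal)
    (l : List (String × TxVal))
    (m oi mm : PySem.Dict String TxVal)
    (hnd : (l.map Prod.fst).Nodup)
    (hm : ∀ kv ∈ l, m.contains kv.1 = false)
    (hoi : ∀ kv ∈ l, oi.contains kv.1 = false)
    (hmm : ∀ kv ∈ l, mm.contains kv.1 = false) :
    (l.foldl
      (fun (acc : PySem.Dict String TxVal × PySem.Dict String TxVal × PySem.Dict String TxVal) kv =>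
        let (matched, only_internal, mismatches) := acc
        if pt.contains kv.1 then
          let pd := pt.getD kv.1 []
          if kv.2 ≠ pd then (matched, only_internal, mismatches.insert kv.1 (mismatchEntry kv.2 pd))
          else (matched.insert kv.1 kv.2, only_internal, mismatches)
        else (matched, only_internal.insert kv.1 kv.2, mismatches)) (m, oi, mm))
    = (l.foldl (fun d kv => if pt.contains kv.1 && (kv.2 == pt.getD kv.1 []) then d.insert kv.1 kv.2 else d) m,
       l.foldl (fun d kv => if !pt.contains kv.1 then d.insert kv.1 kv.2 else d) oi,
       l.foldl (fun d kv => if pt.contains kv.1 && !(kv.2 == pt.getD kv.1 []) then d.insert kv.1 (mismatchEntry kv.2 (pt.getD kv.1 [])) else d) mm) := by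
  induction l generalizing m oi mm with
  | nil => simp
  | cons kv rest ih =>
    simp only [List.map_cons, List.nodup_cons] at hnd
    have hrest : ∀ (d : PySem.Dict String TxVal),
        (∀ p ∈ kv :: rest, d.contains p.1 = false) → ∀ p ∈ rest, d.contains p.1 = false :=
      fun d h p hp => h p (List.mem_cons_of_mem _ hp)
    have hins : ∀ (d : PySem.Dict String TxVal) v,
        (∀ p ∈ kv :: rest, d.contains p.1 = false) →
        ∀ p ∈ rest, (d.insert kv.1 v).contains p.1 = false := by
      intro d v h p hp
      rw [PySem.Dict.contains_insert]
      have : p.1 ≠ kv.1 := fun he => hnd.1 (he ▸ List.mem_map_of_mem hp)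
      simp [this, h p (List.mem_cons_of_mem _ hp)]
    simp only [List.foldl_cons]
    by_cases hc : pt.contains kv.1
    · have hcn : (!pt.contains kv.1) = false := by simp [hc]
      by_cases hv : kv.2 = pt.getD kv.1 []
      · have hvb : (kv.2 == pt.getD kv.1 []) = true := by simp [hv]
        simp only [hc, eq_true hv, hvb, hcn, ne_eq, not_true_eq_false, if_false, if_true,
          Bool.true_and, Bool.not_true, Bool.and_false, Bool.false_eq_true]
        exact ih _ _ _ hnd.2 (hins m _ hm) (hrest oi hoi) (hrest mm hmm)
      · have hvb : (kv.2 == pt.getD kv.1 []) = false := by simp [hv]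
        simp only [hc, hvb, hcn, ne_eq, eq_false hv, not_false_eq_true, if_true, if_false,
          Bool.true_and, Bool.not_false, Bool.false_eq_true]
        exact ih _ _ _ hnd.2 (hrest m hm) (hrest oi hoi) (hins mm _ hmm)
    · have hc' : pt.contains kv.1 = false := by simpa using hc
      simp only [hc', Bool.false_and, Bool.not_false, if_true, if_false, Bool.false_eq_true]
      exact ih _ _ _ hnd.2 (hrest m hm) (hins oi kv.2 hoi) (hrest mm hmm)

-- characterisation of B's single four-bucket loop by four filters
lemma quad_foldl (l : List (String × MVal))
    (m oi op mm : PySem.Dict String TxVal)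
    (hnd : (l.map Prod.fst).Nodup)
    (hm : ∀ kv ∈ l, m.contains kv.1 = false)
    (hoi : ∀ kv ∈ l, oi.contains kv.1 = false)
    (hop : ∀ kv ∈ l, op.contains kv.1 = false)
    (hmm : ∀ kv ∈ l, mm.contains kv.1 = false) :
    l.foldl classifyStep (m, oi, op, mm)
    = (l.foldl (fun d kv => if kv.2.1.isSome && kv.2.2.isSome && (kv.2.1 == kv.2.2) then d.insert kv.1 (kv.2.1.getD []) else d) m,
       l.foldl (fun d kv => if kv.2.1.isSome && !kv.2.2.isSome then d.insert kv.1 (kv.2.1.getD []) else d) oi,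
       l.foldl (fun d kv => if !kv.2.1.isSome then d.insert kv.1 (kv.2.2.getD []) else d) op,
       l.foldl (fun d kv => if kv.2.1.isSome && kv.2.2.isSome && !(kv.2.1 == kv.2.2) then d.insert kv.1 (mismatchEntry (kv.2.1.getD []) (kv.2.2.getD [])) else d) mm) := by
  induction l generalizing m oi op mm with
  | nil => simp
  | cons kv rest ih =>
    simp only [List.map_cons, List.nodup_cons] at hnd
    have hrest : ∀ (d : PySem.Dict String TxVal),
        (∀ p ∈ kv :: rest, d.contains p.1 = false) → ∀ p ∈ rest, d.contains p.1 = false :=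
      fun d h p hp => h p (List.mem_cons_of_mem _ hp)
    have hins : ∀ (d : PySem.Dict String TxVal) v,
        (∀ p ∈ kv :: rest, d.contains p.1 = false) →
        ∀ p ∈ rest, (d.insert kv.1 v).contains p.1 = false := by
      intro d v h p hp
      rw [PySem.Dict.contains_insert]
      have : p.1 ≠ kv.1 := fun he => hnd.1 (he ▸ List.mem_map_of_mem hp)
      simp [this, h p (List.mem_cons_of_mem _ hp)]
    simp only [List.foldl_cons]
    obtain ⟨k, ivo, pvo⟩ := kv
    rcases ivo with _ | iv
    · rcases pvo with _ | pv
      · show rest.foldl classifyStep (m, oi, op.insert k ((none : Option TxVal).getD []), mm) = _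
        simp only [Option.isSome_none, Bool.false_and, Bool.not_false, Bool.false_eq_true,
          if_false, if_true]
        exact ih _ _ _ _ hnd.2 (hrest m hm) (hrest oi hoi) (hins op _ hop) (hrest mm hmm)
      · show rest.foldl classifyStep (m, oi, op.insert k ((some pv : Option TxVal).getD []), mm) = _
        simp only [Option.isSome_none, Option.isSome_some, Bool.false_and, Bool.not_false,
          Bool.false_eq_true, if_false, if_true]
        exact ih _ _ _ _ hnd.2 (hrest m hm) (hrest oi hoi) (hins op _ hop) (hrest mm hmm)
    · rcases pvo with _ | pv
      · show rest.foldl classifyStep (m, oi.insert k iv, op, mm) = _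
        simp only [Option.isSome_none, Option.isSome_some, Bool.true_and, Bool.and_false,
          Bool.not_true, Bool.not_false, Bool.false_eq_true, if_false, if_true, Option.getD_some]
        exact ih _ _ _ _ hnd.2 (hrest m hm) (hins oi _ hoi) (hrest op hop) (hrest mm hmm)
      · by_cases hvv : (iv == pv) = true
        · have hb : ((some iv : Option TxVal) == (some pv : Option TxVal)) = true := by
            simpa using hvv
          show rest.foldl classifyStep (if (iv == pv) = true then (m.insert k iv, oi, op, mm) else (m, oi, op, mm.insert k (mismatchEntry iv pv))) = _
          simp only [hvv, if_true, Option.isSome_some, hb, Bool.true_and, Bool.not_true,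
            Bool.and_false, Bool.false_eq_true, if_false, Option.getD_some]
          exact ih _ _ _ _ hnd.2 (hins m _ hm) (hrest oi hoi) (hrest op hop) (hrest mm hmm)
        · have hb : ((some iv : Option TxVal) == (some pv : Option TxVal)) = false := by
            simpa using hvv
          show rest.foldl classifyStep (if (iv == pv) = true then (m.insert k iv, oi, op, mm) else (m, oi, op, mm.insert k (mismatchEntry iv pv))) = _
          simp only [hvv, if_false, Option.isSome_some, hb, Bool.true_and, Bool.not_false,
            Bool.and_false, Bool.false_eq_true, if_true, Option.getD_some]
          exact ih _ _ _ _ hnd.2 (hrest m hm) (hrest oi hoi) (hrest op hop) (hins mm _ hmm)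

-- 'if c then skip else insert' as 'if !c then insert else skip'
lemma skip_eq {ν : Type} (c : String × ν → Bool) :
    (fun (d : PySem.Dict String ν) kv => if c kv then d else d.insert kv.1 kv.2)
      = (fun d kv => if !(c kv) then d.insert kv.1 kv.2 else d) := by
  funext d kv
  cases h : c kv <;> simp [h]

-- B's 'matched' condition on a merged internal entry equals A's
lemma matched_cond (pt : PySem.Dict String TxVal) (k : String) (v : TxVal) :
    ((pt.get? k).isSome && ((some v : Option TxVal) == pt.get? k)) = (pt.contains k && (v == pt.getD k [])) := by
  rcases h : pt.get? k with _ | w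
  · have : pt.contains k = false := by
      rw [PySem.Dict.contains_eq_isSome_get?, h]; rfl
    simp [this]
  · have hc : pt.contains k = true := by
      rw [PySem.Dict.contains_eq_isSome_get?, h]; rfl
    have hd : pt.getD k [] = w := PySem.Dict.getD_of_get?_eq_some _ [] h
    simp only [hc, hd, Bool.true_and, Option.isSome_some]
    by_cases hvw : v = w <;> simp [hvw, eq_comm]

-- B's 'mismatches' condition on a merged internal entry equals A's
lemma mismatch_cond (pt : PySem.Dict String TxVal) (k : String) (v : TxVal) :
    ((pt.get? k).isSome && !((some v : Option TxVal) == pt.get? k)) = (pt.contains k && !(v == pt.getD k [])) := by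
  rcases h : pt.get? k with _ | w
  · have : pt.contains k = false := by
      rw [PySem.Dict.contains_eq_isSome_get?, h]; rfl
    simp [this]
  · have hc : pt.contains k = true := by
      rw [PySem.Dict.contains_eq_isSome_get?, h]; rfl
    have hd : pt.getD k [] = w := PySem.Dict.getD_of_get?_eq_some _ [] h
    simp only [hc, hd, Bool.true_and, Option.isSome_some]
    by_cases hvw : v = w <;> simp [hvw, eq_comm]

-- B's 'only_internal' condition on a merged internal entry equals A's
lemma oi_cond (pt : PySem.Dict String TxVal) (k : String) :
    (!(pt.get? k).isSome) = (!pt.contains k) := by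
  rw [PySem.Dict.contains_eq_isSome_get?]

-- a filtered bucket drawn from the internal segment of the merged table
lemma bucket_internal_eq (it pt : PySem.Dict String TxVal)
    (c : String × MVal → Bool) (gv : String × MVal → TxVal)
    (cA : String × TxVal → Bool) (gA : String × TxVal → TxVal)
    (h1 : ∀ kv : String × TxVal, c (kv.1, ((some kv.2 : Option TxVal), pt.get? kv.1)) = cA kv)
    (h2 : ∀ kv : String × TxVal, gv (kv.1, ((some kv.2 : Option TxVal), pt.get? kv.1)) = gA kv)
    (h3 : ∀ kv : String × TxVal, c (kv.1, ((none : Option TxVal), some kv.2)) = false) :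
    ((combineItems it pt).filter c).map (fun kv => (kv.1, gv kv))
      = (it.items.filter cA).map (fun kv => (kv.1, gA kv)) := by
  unfold combineItems
  rw [List.filter_append, List.filter_map, List.filter_map, List.map_append, List.map_map, List.map_map]
  have hseg2 : (pt.items.filter (fun p => !it.contains p.1)).filter
      ((fun kv => c kv) ∘ fun p => (p.1, ((none : Option TxVal), some p.2))) = [] := by
    apply List.filter_eq_nil_iff.mpr
    intro p _
    simp [Function.comp, h3 p]
  have hseg1 : it.items.filter ((fun kv => c kv) ∘ fun p => (p.1, ((some p.2 : Option TxVal), pt.get? p.1)))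
      = it.items.filter cA := by
    apply List.filter_congr
    intro p _
    simp [Function.comp, h1 p]
  rw [hseg2, hseg1]
  simp only [List.map_nil, List.append_nil]
  apply List.map_congr_left
  intro p _
  simp [Function.comp, h2 p]

-- the 'only_provider' bucket is exactly the provider-only segment of the merged table
lemma bucket_provider_eq (it pt : PySem.Dict String TxVal)
    (c : String × MVal → Bool) (gv : String × MVal → TxVal)
    (h1 : ∀ kv : String × TxVal, c (kv.1, ((some kv.2 : Option TxVal), pt.get? kv.1)) = false)
    (h2 : ∀ kv : String × TxVal, c (kv.1, ((none : Option TxVal), some kv.2)) = true)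
    (h3 : ∀ kv : String × TxVal, gv (kv.1, ((none : Option TxVal), some kv.2)) = kv.2) :
    ((combineItems it pt).filter c).map (fun kv => (kv.1, gv kv))
      = (pt.items.filter (fun kv => !it.contains kv.1)).map (fun kv => (kv.1, kv.2)) := by
  unfold combineItems
  rw [List.filter_append, List.filter_map, List.filter_map, List.map_append, List.map_map, List.map_map]
  have hseg1 : it.items.filter ((fun kv => c kv) ∘ fun p => (p.1, ((some p.2 : Option TxVal), pt.get? p.1))) = [] := by
    apply List.filter_eq_nil_iff.mpr
    intro p _
    simp [Function.comp, h1 p]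
  have hseg2 : (pt.items.filter (fun p => !it.contains p.1)).filter
      ((fun kv => c kv) ∘ fun p => (p.1, ((none : Option TxVal), some p.2)))
      = pt.items.filter (fun p => !it.contains p.1) := by
    apply List.filter_eq_self.mpr
    intro p _
    simp [Function.comp, h2 p]
  rw [hseg1, hseg2]
  simp only [List.map_nil, List.nil_append]
  apply List.map_congr_left
  intro p _
  simp [Function.comp, h3 p]

-- ===== VERDICT (by name: the statement is the Claim_ definition above) =====
theorem compare_datasets_spec : Claim_equal_compare_datasets := by
  intro i p _ _
  unfold Spec_compare_datasets
  simp only [compare_datasets, compare_datasets_alt]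
  have hit := nodup_keys_mkTx i
  have hpt := nodup_keys_mkTx p
  -- the merged table is A's two indexes combined
  have hint : ((PySem.List.slice i (some 1) none).foldl (mergeStep true) PySem.Dict.empty).items
      = combineItems (mkTx i) PySem.Dict.empty := by
    rw [internal_inv (PySem.List.slice i (some 1) none) PySem.Dict.empty PySem.Dict.empty rfl]
    unfold combineItems
    have he : (PySem.Dict.empty : PySem.Dict String TxVal).items = [] := rfl
    have hg : ∀ k, (PySem.Dict.empty : PySem.Dict String TxVal).get? k = (none : Option TxVal) := fun _ => rfl
    simp only [he, List.filter_nil, List.map_nil, List.append_nil, hg]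
    rfl
  have hmerged : ((PySem.List.slice p (some 1) none).foldl (mergeStep false)
        ((PySem.List.slice i (some 1) none).foldl (mergeStep true) PySem.Dict.empty)).items
      = combineItems (mkTx i) (mkTx p) :=
    provider_inv (mkTx i) hit (PySem.List.slice p (some 1) none) PySem.Dict.empty _ hint
  have hempty : ∀ {α : Type} (l : List (String × α)) (kv : String × α), kv ∈ l →
      (PySem.Dict.empty (κ := String) (ν := TxVal)).contains kv.1 = false := by
    intro α l kv _; rfl
  rw [hmerged,
    quad_foldl (combineItems (mkTx i) (mkTx p)) _ _ _ _
      (nodup_keys_combine (mkTx i) (mkTx p) hit hpt)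
      (hempty _) (hempty _) (hempty _) (hempty _),
    tri_foldl (mkTx p) (mkTx i).items _ _ _ hit (hempty _) (hempty _) (hempty _)]
  simp only [skip_eq (fun kv : String × TxVal => (mkTx i).contains kv.1)]
  rw [items_foldl_filter_insert (fun kv => (mkTx p).contains kv.1 && (kv.2 == (mkTx p).getD kv.1 [])) (fun kv => kv.2) _ _ hit (hempty _),
      items_foldl_filter_insert (fun kv => !(mkTx p).contains kv.1) (fun kv => kv.2) _ _ hit (hempty _),
      items_foldl_filter_insert (fun kv => !(mkTx i).contains kv.1) (fun kv => kv.2) _ _ hpt (hempty _),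
      items_foldl_filter_insert (fun kv => (mkTx p).contains kv.1 && !(kv.2 == (mkTx p).getD kv.1 [])) (fun kv => mismatchEntry kv.2 ((mkTx p).getD kv.1 [])) _ _ hit (hempty _),
      items_foldl_filter_insert (fun kv : String × MVal => kv.2.1.isSome && kv.2.2.isSome && (kv.2.1 == kv.2.2)) (fun kv => kv.2.1.getD []) _ _ (nodup_keys_combine (mkTx i) (mkTx p) hit hpt) (hempty _),
      items_foldl_filter_insert (fun kv : String × MVal => kv.2.1.isSome && !kv.2.2.isSome) (fun kv => kv.2.1.getD []) _ _ (nodup_keys_combine (mkTx i) (mkTx p) hit hpt) (hempty _),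
      items_foldl_filter_insert (fun kv : String × MVal => !kv.2.1.isSome) (fun kv => kv.2.2.getD []) _ _ (nodup_keys_combine (mkTx i) (mkTx p) hit hpt) (hempty _),
      items_foldl_filter_insert (fun kv : String × MVal => kv.2.1.isSome && kv.2.2.isSome && !(kv.2.1 == kv.2.2)) (fun kv => mismatchEntry (kv.2.1.getD []) (kv.2.2.getD [])) _ _ (nodup_keys_combine (mkTx i) (mkTx p) hit hpt) (hempty _)]
  rw [bucket_internal_eq (mkTx i) (mkTx p)
        (fun kv => kv.2.1.isSome && kv.2.2.isSome && (kv.2.1 == kv.2.2)) (fun kv => kv.2.1.getD [])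
        (fun kv => (mkTx p).contains kv.1 && (kv.2 == (mkTx p).getD kv.1 [])) (fun kv => kv.2)
        (fun kv => by simpa using matched_cond (mkTx p) kv.1 kv.2)
        (fun kv => rfl) (fun kv => rfl),
      bucket_internal_eq (mkTx i) (mkTx p)
        (fun kv => kv.2.1.isSome && !kv.2.2.isSome) (fun kv => kv.2.1.getD [])
        (fun kv => !(mkTx p).contains kv.1) (fun kv => kv.2)
        (fun kv => by simpa using oi_cond (mkTx p) kv.1)
        (fun kv => rfl) (fun kv => rfl),
      bucket_internal_eq (mkTx i) (mkTx p)
        (fun kv => kv.2.1.isSome && kv.2.2.isSome && !(kv.2.1 == kv.2.2)) (fun kv => mismatchEntry (kv.2.1.getD []) (kv.2.2.getD []))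
        (fun kv => (mkTx p).contains kv.1 && !(kv.2 == (mkTx p).getD kv.1 [])) (fun kv => mismatchEntry kv.2 ((mkTx p).getD kv.1 []))
        (fun kv => by simpa using mismatch_cond (mkTx p) kv.1 kv.2)
        (fun kv => by simp [PySem.Dict.getD_eq_get?_getD]) (fun kv => rfl),
      bucket_provider_eq (mkTx i) (mkTx p)
        (fun kv => !kv.2.1.isSome) (fun kv => kv.2.2.getD [])
        (fun kv => rfl) (fun kv => rfl) (fun kv => rfl)]
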